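-- pv_equiv track=rewrite | github.com/xiao-zentith/Microfluidics-Chip | src/microfluidics_chip/pipelines/stage1.py | _build_semantic_roles
-- ===== SOURCE A (Python) =====
-- from typing import Optional, List, Dict, Tuple, Any
--
-- def _build_semantic_roles(
--     template_ids: List[str],
--     blank_idx: Optional[int]
-- ) -> Tuple[List[str], Dict[str, str], Dict[str, str]]:
--     """
--     基于 blank 所在臂，输出顺时针语义顺序和每个 template_id 的语义角色。
--     """
--     if len(template_ids) < 12:
--         return [], {}, {}
--
--     arms = [template_ids[i * 3:(i + 1) * 3] for i in range(4)]
--     arm_start = max(0, min(3, int(blank_idx) // 3)) if blank_idx is not None else 0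
--     ordered_arm_indices = [(arm_start + k) % 4 for k in range(4)]
--
--     semantic_order_clockwise_from_blank: List[str] = []
--     for arm_idx in ordered_arm_indices:
--         semantic_order_clockwise_from_blank.extend(arms[arm_idx])
--
--     roles_by_template: Dict[str, str] = {}
--     arm_role_by_template: Dict[str, str] = {}
--
--     reference_roles = ["Enzyme-1", "Enzyme-2", "Liquid-only"]
--     assay_names = ["Glucose", "Cholesterol", "UricAcid"]
--
--     reference_arm = arms[ordered_arm_indices[0]]
--     for i, tid in enumerate(reference_arm):
--         role = reference_roles[min(i, len(reference_roles) - 1)]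
--         roles_by_template[tid] = role
--         arm_role_by_template[tid] = "ReferenceArm"
--
--     for arm_offset, assay in enumerate(assay_names, start=1):
--         assay_arm = arms[ordered_arm_indices[arm_offset]]
--         for rep_idx, tid in enumerate(assay_arm, start=1):
--             roles_by_template[tid] = f"{assay}_rep{rep_idx}"
--             arm_role_by_template[tid] = assay
--
--     return semantic_order_clockwise_from_blank, roles_by_template, arm_role_by_template
-- ===== SOURCE B (Python) =====
-- from typing import Optional, List, Dict, Tuple
--
--
-- def _build_semantic_roles(
--     template_ids: List[str],
--     blank_idx: Optional[int]
-- ) -> Tuple[List[str], Dict[str, str], Dict[str, str]]: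
--     """Single zip pass over flat label tables instead of per-arm enumerate loops."""
--     if len(template_ids) < 12:
--         return [], {}, {}
--
--     arms = [template_ids[i * 3:(i + 1) * 3] for i in range(4)]
--     start = max(0, min(3, int(blank_idx) // 3)) if blank_idx is not None else 0
--
--     semantic_order: List[str] = []
--     for k in range(4):
--         semantic_order += arms[(start + k) % 4]
--
--     assays = ["Glucose", "Cholesterol", "UricAcid"]
--     roles = ["Enzyme-1", "Enzyme-2", "Liquid-only"] + \
--         [f"{a}_rep{r}" for a in assays for r in range(1, 4)]
--     arm_roles = ["ReferenceArm"] * 3 + [a for a in assays for _ in range(3)]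
--
--     roles_by_template: Dict[str, str] = {}
--     arm_role_by_template: Dict[str, str] = {}
--     for tid, role, arm_role in zip(semantic_order, roles, arm_roles):
--         roles_by_template[tid] = role
--         arm_role_by_template[tid] = arm_role
--
--     return semantic_order, roles_by_template, arm_role_by_template
-- ===== Notes on version B (the rewrite author's own statement) =====
-- stated objective: simpler
-- what changed: A labels templates with three separate per-arm loops (a reference-arm enumerate with a clamped role lookup, plus a nested enumerate over assay arms); B builds two flat 12-entry label tables once and fills both dicts in a single zip pass over the semantic order.
import Mathlib
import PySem

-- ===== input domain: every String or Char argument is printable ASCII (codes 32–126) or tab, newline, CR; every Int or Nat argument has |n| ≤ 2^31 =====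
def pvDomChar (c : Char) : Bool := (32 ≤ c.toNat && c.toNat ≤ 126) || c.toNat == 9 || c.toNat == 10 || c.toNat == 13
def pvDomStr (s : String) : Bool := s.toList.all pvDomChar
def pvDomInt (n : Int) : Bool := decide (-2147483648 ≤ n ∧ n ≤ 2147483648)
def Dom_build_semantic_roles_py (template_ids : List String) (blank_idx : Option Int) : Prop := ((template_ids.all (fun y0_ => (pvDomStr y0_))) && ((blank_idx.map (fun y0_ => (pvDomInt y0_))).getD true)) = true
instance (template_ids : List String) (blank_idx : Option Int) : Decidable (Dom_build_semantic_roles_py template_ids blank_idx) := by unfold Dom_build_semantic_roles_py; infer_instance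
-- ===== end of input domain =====

-- B replaces A's three per-arm labelling loops by one zip pass over flat label tables (objective: simpler).

-- ===== PORT A =====
def build_semantic_roles_py (template_ids : List String) (blank_idx : Option Int) : List String × (List (String × String)) × (List (String × String)) :=
  if template_ids.length < 12 then ([], [], [])
  else
    let arms : List (List String) :=
      (PySem.List.pyRange 0 4 1).map (fun i => PySem.List.slice template_ids (some (i * 3)) (some ((i + 1) * 3)))
    let arm_start : Int :=
      match blank_idx with
      | none => 0
      | some b => max 0 (min 3 (PySem.Int.floordiv b 3))
    let ordered_arm_indices : List Int := (PySem.List.pyRange 0 4 1).map (fun k => PySem.Int.mod (arm_start + k) 4)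
    -- arms[arm_idx]: index provably in range (0..3), so .getD [] never fires
    let semantic_order : List String :=
      ordered_arm_indices.foldl (fun acc arm_idx => acc ++ ((PySem.List.pyGet? arms arm_idx).getD [])) []
    let reference_roles : List String := ["Enzyme-1", "Enzyme-2", "Liquid-only"]
    let assay_names : List String := ["Glucose", "Cholesterol", "UricAcid"]
    let reference_arm : List String := (PySem.List.pyGet? arms ((PySem.List.pyGet? ordered_arm_indices 0).getD 0)).getD []
    let st1 : PySem.Dict String String × PySem.Dict String String :=
      (PySem.List.enumerate reference_arm 0).foldl
        (fun st p =>
          let role := (PySem.List.pyGet? reference_roles (min p.1 ((reference_roles.length : Int) - 1))).getD ""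
          (st.1.insert p.2 role, st.2.insert p.2 "ReferenceArm"))
        (PySem.Dict.empty, PySem.Dict.empty)
    let st2 : PySem.Dict String String × PySem.Dict String String :=
      (PySem.List.enumerate assay_names 1).foldl
        (fun st q =>
          let assay_arm := (PySem.List.pyGet? arms ((PySem.List.pyGet? ordered_arm_indices q.1).getD 0)).getD []
          (PySem.List.enumerate assay_arm 1).foldl
            (fun st p =>
              (st.1.insert p.2 (q.2 ++ "_rep" ++ PySem.Int.toStr p.1), st.2.insert p.2 q.2))
            st)
        st1
    (semantic_order, st2.1.items, st2.2.items)

-- ===== PORT B =====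
def build_semantic_roles_py_alt (template_ids : List String) (blank_idx : Option Int) : List String × (List (String × String)) × (List (String × String)) :=
  if template_ids.length < 12 then ([], [], [])
  else
    let arms : List (List String) :=
      (PySem.List.pyRange 0 4 1).map (fun i => PySem.List.slice template_ids (some (i * 3)) (some ((i + 1) * 3)))
    let start : Int :=
      match blank_idx with
      | none => 0
      | some b => max 0 (min 3 (PySem.Int.floordiv b 3))
    -- arms[(start+k) % 4]: index provably in range (0..3), so .getD [] never fires
    let semantic_order : List String :=
      (PySem.List.pyRange 0 4 1).foldl
        (fun acc k => acc ++ ((PySem.List.pyGet? arms (PySem.Int.mod (start + k) 4)).getD [])) []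
    let assays : List String := ["Glucose", "Cholesterol", "UricAcid"]
    let roles : List String :=
      ["Enzyme-1", "Enzyme-2", "Liquid-only"] ++
        assays.flatMap (fun a => (PySem.List.pyRange 1 4 1).map (fun r => a ++ "_rep" ++ PySem.Int.toStr r))
    let arm_roles : List String :=
      ["ReferenceArm", "ReferenceArm", "ReferenceArm"] ++ assays.flatMap (fun a => [a, a, a])
    let st : PySem.Dict String String × PySem.Dict String String :=
      (semantic_order.zip (roles.zip arm_roles)).foldl
        (fun st p => (st.1.insert p.1 p.2.1, st.2.insert p.1 p.2.2))
        (PySem.Dict.empty, PySem.Dict.empty)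
    (semantic_order, st.1.items, st.2.items)

-- ===== PRECONDITION & SPEC =====
def Spec_build_semantic_roles_py (template_ids : List String) (blank_idx : Option Int) (out : List String × (List (String × String)) × (List (String × String))) : Prop := out = build_semantic_roles_py_alt template_ids blank_idx
instance (template_ids : List String) (blank_idx : Option Int) (out : List String × (List (String × String)) × (List (String × String))) : Decidable (Spec_build_semantic_roles_py template_ids blank_idx out) := by unfold Spec_build_semantic_roles_py; infer_instance

-- ===== CLAIM (what is proved, stated in full; the proofs are below) =====
def Claim_equal_build_semantic_roles_py : Prop := ∀ (template_ids : List String) (blank_idx : Option Int), Dom_build_semantic_roles_py template_ids blank_idx → Spec_build_semantic_roles_py template_ids blank_idx (build_semantic_roles_py template_ids blank_idx)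

-- ===== LEMMAS AND PROOFS =====

-- ===== VERDICT (by name: the statement is the Claim_ definition above) =====
theorem build_semantic_roles_py_spec : Claim_equal_build_semantic_roles_py := by
  intro tids bi _
  unfold Spec_build_semantic_roles_py
  by_cases h : tids.length < 12
  · unfold build_semantic_roles_py build_semantic_roles_py_alt
    rw [if_pos h, if_pos h]
  · rcases tids with _|⟨t0,_|⟨t1,_|⟨t2,_|⟨t3,_|⟨t4,_|⟨t5,_|⟨t6,_|⟨t7,_|⟨t8,_|⟨t9,_|⟨t10,_|⟨t11,rest⟩⟩⟩⟩⟩⟩⟩⟩⟩⟩⟩⟩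
    all_goals try { exfalso; simp only [List.length_cons, List.length_nil] at h; omega }
    cases bi with
    | none => rfl
    | some b =>
      have h0 : (0:Int) ≤ max 0 (min 3 (PySem.Int.floordiv b 3)) := le_max_left _ _
      have h3 : max 0 (min 3 (PySem.Int.floordiv b 3)) ≤ 3 := max_le (by norm_num) (min_le_left _ _)
      unfold build_semantic_roles_py build_semantic_roles_py_alt
      have hred : (match some b with | none => (0:Int) | some b => max 0 (min 3 (PySem.Int.floordiv b 3))) = max 0 (min 3 (PySem.Int.floordiv b 3)) := rfl
      rw [hred]
      generalize hm : max 0 (min 3 (PySem.Int.floordiv b 3)) = m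
      rw [hm] at h0 h3
      interval_cases m <;> rfl
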